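-- pv_equiv track=rewrite | github.com/benmtw/CommonFunctions | src/common_functions/email_utils.py | _domain_in_set
-- ===== SOURCE A (Python) =====
-- def _domain_in_set(domain: str, domains: set[str]) -> bool:
--     if domain in domains:
--         return True
--     parts = domain.split(".")
--     for i in range(1, len(parts) - 1):
--         candidate = ".".join(parts[i:])
--         if candidate in domains:
--             return True
--     return False
-- ===== SOURCE B (Python) =====
-- def _domain_in_set(domain: str, domains: set[str]) -> bool:
--     # Scan the set itself: an entry matches if it equals the domain outright,
--     # or (being a multi-label parent, i.e. containing a dot) is a proper
--     # dot-boundary suffix of the domain.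
--     for d in domains:
--         if d == domain or ("." in d and domain.endswith("." + d)):
--             return True
--     return False
-- ===== Notes on version B (the rewrite author's own statement) =====
-- stated objective: alternative
-- what changed: Instead of splitting the domain into labels and hashing every candidate suffix against the set, B scans the set once and tests each entry directly with an equality or a dot-boundary endswith check, never building candidate strings.
import Mathlib
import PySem

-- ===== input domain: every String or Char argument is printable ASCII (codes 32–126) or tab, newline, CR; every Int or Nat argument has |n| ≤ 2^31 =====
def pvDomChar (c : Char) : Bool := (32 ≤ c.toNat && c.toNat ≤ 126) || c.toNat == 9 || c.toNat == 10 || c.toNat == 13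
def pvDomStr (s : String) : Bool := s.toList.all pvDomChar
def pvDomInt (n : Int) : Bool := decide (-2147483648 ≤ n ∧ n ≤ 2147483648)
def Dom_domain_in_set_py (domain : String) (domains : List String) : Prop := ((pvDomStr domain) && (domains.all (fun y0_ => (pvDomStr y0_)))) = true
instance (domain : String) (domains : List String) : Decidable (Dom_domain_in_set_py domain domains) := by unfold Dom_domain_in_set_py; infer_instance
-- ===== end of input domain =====

-- B scans the set itself (equality or dot-boundary endswith per entry) instead of
-- splitting the domain and hashing each candidate suffix; objective: alternative.

-- ===== PORT A =====
def domain_in_set_py (domain : String) (domains : List String) : Bool :=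
  if PySem.Set.contains domains domain then true
  else
    -- domain.split(".") ; sep "." is nonempty so split? is always `some`
    let parts : List String := (PySem.Str.split? domain ".").getD []
    -- for i in range(1, len(parts) - 1): if ".".join(parts[i:]) in domains: return True
    (PySem.List.pyRange 1 ((parts.length : Int) - 1) 1).any (fun i =>
      PySem.Set.contains domains (PySem.Str.join "." (PySem.List.slice parts (some i) none)))

-- ===== PORT B =====
def domain_in_set_py_alt (domain : String) (domains : List String) : Bool :=
  domains.any (fun d =>
    d == domain || (PySem.Str.isIn "." d && PySem.Str.endswith domain ("." ++ d)))

-- ===== PRECONDITION & SPEC =====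
def Spec_domain_in_set_py (domain : String) (domains : List String) (out : Bool) : Prop := out = domain_in_set_py_alt domain domains
instance (domain : String) (domains : List String) (out : Bool) : Decidable (Spec_domain_in_set_py domain domains out) := by unfold Spec_domain_in_set_py; infer_instance

-- ===== CLAIM (what is proved, stated in full; the proofs are below) =====
def Claim_equal_domain_in_set_py : Prop := ∀ (domain : String) (domains : List String), Dom_domain_in_set_py domain domains → Spec_domain_in_set_py domain domains (domain_in_set_py domain domains)

-- ===== LEMMAS AND PROOFS =====

-- splitOn.go with a single-char separator computes List.splitOn (up to the carried state)
theorem pv_go_eq (c : Char) (fuel : Nat) (l cur : List Char) (acc : List (List Char))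
    (h : l.length < fuel) :
    PySem.Chars.splitOn.go [c] fuel l cur acc
      = acc.reverse ++ (l.splitOn c).modifyHead (cur.reverse ++ ·) := by
  induction fuel generalizing l cur acc with
  | zero => omega
  | succ fuel ih =>
    cases l with
    | nil =>
      simp [PySem.Chars.splitOn.go, List.splitOn, List.splitOnP_nil]
    | cons x rest =>
      by_cases hx : x = c
      · subst hx
        rw [PySem.Chars.splitOn.go]
        have hpre : List.isPrefixOf [x] (x :: rest) = true := by
          simp [List.isPrefixOf]
        simp only [hpre, if_pos]
        rw [show List.drop ([x].length) (x :: rest) = rest from rfl]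
        rw [ih rest [] (cur.reverse :: acc) (by simpa using Nat.lt_of_succ_lt_succ (by simpa using h))]
        simp [List.splitOn, List.splitOnP_cons]
        exact congrFun List.modifyHead_id _
      · rw [PySem.Chars.splitOn.go]
        have hpre : List.isPrefixOf [c] (x :: rest) = false := by
          simp [List.isPrefixOf]
          exact fun hc => absurd hc.symm hx
        simp only [hpre, Bool.false_eq_true, if_neg, not_false_iff]
        rw [ih rest (x :: cur) acc (by simpa using Nat.lt_of_succ_lt_succ (by simpa using h))]
        have hne : x = c ↔ False := ⟨hx, False.elim⟩
        simp [List.splitOn, List.splitOnP_cons, hx, List.modifyHead_modifyHead, Function.comp_def]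

theorem pv_splitOn_ne_nil (c : Char) (l : List Char) : l.splitOn c ≠ [] := by
  simpa [List.splitOn] using List.splitOnP_ne_nil (· == c) l

theorem pv_splitOn_eq (c : Char) (l : List Char) :
    PySem.Chars.splitOn l [c] = l.splitOn c := by
  unfold PySem.Chars.splitOn
  rw [pv_go_eq c (l.length + 1) l [] [] (by omega)]
  cases h : l.splitOn c with
  | nil => exact absurd h (pv_splitOn_ne_nil c l)
  | cons a t => simp [List.modifyHead]

theorem pv_not_mem_of_mem_splitOn (c : Char) (l : List Char) :
    ∀ p ∈ l.splitOn c, c ∉ p := by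
  induction l with
  | nil =>
    intro p hp
    simp [List.splitOn, List.splitOnP_nil] at hp
    simp [hp]
  | cons x rest ih =>
    intro p hp
    by_cases hx : x = c
    · subst hx
      simp [List.splitOn, List.splitOnP_cons] at hp
      rcases hp with hp | hp
      · simp [hp]
      · exact ih p (by simpa [List.splitOn] using hp)
    · obtain ⟨h0, t, ht⟩ : ∃ h0 t, rest.splitOn c = h0 :: t := by
        cases h : rest.splitOn c with
        | nil => exact absurd h (pv_splitOn_ne_nil c rest)
        | cons a t => exact ⟨a, t, rfl⟩
      simp [List.splitOn, List.splitOnP_cons, hx] at hp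
      rw [show List.splitOnP (· == c) rest = h0 :: t by simpa [List.splitOn] using ht] at hp
      simp at hp
      rcases hp with hp | hp
      · subst hp
        have hh : c ∉ h0 := ih h0 (by simp [ht])
        simp [hh]
        exact fun hc => absurd hc.symm hx
      · exact ih p (by simp [ht, hp])

theorem pv_splitOn_append (c : Char) (a d : List Char) :
    (a ++ c :: d).splitOn c = a.splitOn c ++ d.splitOn c := by
  induction a with
  | nil => simp [List.splitOn, List.splitOnP_cons]
  | cons x rest ih =>
    by_cases hx : x = c
    · subst hx
      simp [List.splitOn, List.splitOnP_cons] at ih ⊢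
      simpa [List.splitOn] using ih
    · obtain ⟨h0, t, ht⟩ : ∃ h0 t, rest.splitOn c = h0 :: t := by
        cases h : rest.splitOn c with
        | nil => exact absurd h (pv_splitOn_ne_nil c rest)
        | cons p t => exact ⟨p, t, rfl⟩
      have ht' : List.splitOnP (· == c) rest = h0 :: t := by simpa [List.splitOn] using ht
      simp [List.splitOn, List.splitOnP_cons, hx] at ih ⊢
      rw [show List.splitOnP (· == c) (rest ++ c :: d) = (h0 :: t) ++ d.splitOn c by
            rw [ih, ht']; rfl, ht']
      simp
      rfl

theorem pv_join_splitOn (c : Char) (l : List Char) :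
    PySem.Chars.join [c] (l.splitOn c) = l := by
  simpa [PySem.Chars.join] using List.intercalate_splitOn l c

theorem pv_join_append (c : Char) (A B : List (List Char)) (hA : A ≠ []) (hB : B ≠ []) :
    PySem.Chars.join [c] (A ++ B)
      = PySem.Chars.join [c] A ++ c :: PySem.Chars.join [c] B := by
  induction A with
  | nil => exact absurd rfl hA
  | cons p A' ih =>
    cases A' with
    | nil =>
      cases B with
      | nil => exact absurd rfl hB
      | cons q t => simp [PySem.Chars.join_cons_cons, PySem.Chars.join_singleton]
    | cons p2 A'' =>
      have := ih (by simp)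
      rw [show (p :: p2 :: A'') ++ B = p :: ((p2 :: A'') ++ B) by simp]
      rw [show (p2 :: A'') ++ B = p2 :: (A'' ++ B) by simp]
      rw [PySem.Chars.join_cons_cons, PySem.Chars.join_cons_cons]
      rw [show p2 :: (A'' ++ B) = (p2 :: A'') ++ B by simp, this]
      simp

-- the candidates of A's loop are exactly B's dot-containing dot-boundary suffixes
theorem pv_key (L d : List Char) :
    (∃ k : Nat, 1 ≤ k ∧ (k : Int) < ((L.splitOn '.').length : Int) - 1 ∧
        d = PySem.Chars.join ['.'] ((L.splitOn '.').drop k))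
      ↔ ('.' ∈ d ∧ ('.' :: d) <:+ L) := by
  constructor
  · rintro ⟨k, hk1, hk2, rfl⟩
    set S := L.splitOn '.' with hS
    have hkS : k + 2 ≤ S.length := by omega
    obtain ⟨p, q, t, hd⟩ : ∃ p q t, S.drop k = p :: q :: t := by
      cases h : S.drop k with
      | nil => exfalso; have := List.length_drop (l := S) (i := k); rw [h] at this; simp at this; omega
      | cons p r =>
        cases r with
        | nil =>
          exfalso
          have := List.length_drop (l := S) (i := k); rw [h] at this; simp at this; omega
        | cons q t => exact ⟨p, q, t, rfl⟩
    constructor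
    · rw [hd, PySem.Chars.join_cons_cons]; simp
    · have htk : S.take k ≠ [] := by
        intro h
        have := List.length_take_of_le (le_of_lt (by omega : k < S.length)) (l := S)
        rw [h] at this; simp at this; omega
      have hdk : S.drop k ≠ [] := by rw [hd]; simp
      have hL : L = PySem.Chars.join ['.'] S := (pv_join_splitOn '.' L).symm
      have : L = PySem.Chars.join ['.'] (S.take k ++ S.drop k) := by
        rw [List.take_append_drop]; exact hL
      rw [pv_join_append '.' _ _ htk hdk] at this
      exact ⟨_, this.symm⟩
  · rintro ⟨hdot, a, ha⟩
    set S := L.splitOn '.' with hS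
    have hsplit : S = a.splitOn '.' ++ d.splitOn '.' := by
      rw [hS, ← ha, pv_splitOn_append]
    set k := (a.splitOn '.').length with hk
    have hk1 : 1 ≤ k := by
      have := pv_splitOn_ne_nil '.' a
      cases h : a.splitOn '.' with
      | nil => exact absurd h this
      | cons p t => simp [hk, h]
    have hdrop : S.drop k = d.splitOn '.' := by
      rw [hsplit, List.drop_append_of_le_length (by omega), List.drop_length]
      simp
    have hd2 : 2 ≤ (d.splitOn '.').length := by
      rcases h : d.splitOn '.' with _ | ⟨p, _ | ⟨q, t⟩⟩
      · exact absurd h (pv_splitOn_ne_nil '.' d)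
      · exfalso
        have hdp : d = p := by
          have := pv_join_splitOn '.' d
          rw [h, PySem.Chars.join_singleton] at this
          exact this.symm
        exact pv_not_mem_of_mem_splitOn '.' d p (by simp [h]) (hdp ▸ hdot)
      · simp
    refine ⟨k, hk1, ?_, ?_⟩
    · have : S.length = k + (d.splitOn '.').length := by rw [hsplit]; simp [hk]
      omega
    · rw [hdrop, pv_join_splitOn]

-- bridge: A's `parts` list, as lists of chars
theorem pv_parts_eq (domain : String) :
    ((PySem.Str.split? domain ".").getD []) = (domain.toList.splitOn '.').map String.ofList := by
  simp [PySem.Str.split?, PySem.Chars.split?, show (".").toList = ['.'] from rfl,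
        pv_splitOn_eq]

theorem pv_main (domain : String) (domains : List String) :
    domain_in_set_py domain domains = domain_in_set_py_alt domain domains := by
  rw [Bool.eq_iff_iff]
  unfold domain_in_set_py domain_in_set_py_alt
  rw [pv_parts_eq]
  set S := domain.toList.splitOn '.' with hS
  by_cases hmem : domain ∈ domains
  · simp [hmem, List.any_eq_true]
    exact ⟨domain, hmem, by simp⟩
  · rw [if_neg (by simpa [PySem.Set.contains_iff] using hmem)]
    simp only [List.any_eq_true]
    constructor
    · rintro ⟨i, hi, hcand⟩
      rw [PySem.List.mem_pyRange_one] at hi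
      have hi0 : 0 ≤ i := by omega
      rw [PySem.List.slice_from _ hi0] at hcand
      set k := i.toNat with hkdef
      have hik : (i : Int) = (k : Int) := by omega
      refine ⟨PySem.Str.join "." ((S.map String.ofList).drop k),
        by simpa [PySem.Set.contains_iff] using hcand, ?_⟩
      have hklen : k ≥ 1 ∧ (k : Int) < ((S.map String.ofList).length : Int) - 1 := by
        constructor <;> omega
      have hcd : (PySem.Str.join "." ((S.map String.ofList).drop k)).toList
          = PySem.Chars.join ['.'] (S.drop k) := by
        simp [PySem.Str.join, show (".").toList = ['.'] from rfl, ← List.map_drop,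
              List.map_map, Function.comp_def, String.toList_ofList]
      have hkey := (pv_key domain.toList (PySem.Chars.join ['.'] (S.drop k))).mp
        ⟨k, hklen.1, by simpa [hS] using hklen.2, rfl⟩
      rw [Bool.or_eq_true, Bool.and_eq_true]
      right
      constructor
      · rw [PySem.Str.isIn_eq]
        rw [show (".").toList = ['.'] from rfl]
        rw [PySem.Chars.isIn_iff_infix, List.singleton_infix_iff, hcd]
        exact hkey.1
      · rw [PySem.Str.endswith_eq, PySem.Chars.endswith_iff]
        have : ("." ++ PySem.Str.join "." ((S.map String.ofList).drop k)).toList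
            = '.' :: PySem.Chars.join ['.'] (S.drop k) := by
          rw [String.toList_append, hcd]; rfl
        rw [this]
        exact hkey.2
    · rintro ⟨d, hd, hcond⟩
      rw [Bool.or_eq_true, Bool.and_eq_true] at hcond
      rcases hcond with heq | ⟨hdot, hsuf⟩
      · have hde : d = domain := by simpa using heq
        exact absurd (hde ▸ hd) hmem
      · rw [PySem.Str.isIn_eq, show (".").toList = ['.'] from rfl,
            PySem.Chars.isIn_iff_infix, List.singleton_infix_iff] at hdot
        rw [PySem.Str.endswith_eq, PySem.Chars.endswith_iff,
            show ("." ++ d).toList = '.' :: d.toList by rw [String.toList_append]; rfl] at hsuf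
        obtain ⟨k, hk1, hk2, hdk⟩ := (pv_key domain.toList d.toList).mpr ⟨hdot, hsuf⟩
        refine ⟨(k : Int), ?_, ?_⟩
        · rw [PySem.List.mem_pyRange_one]
          constructor
          · exact_mod_cast hk1
          · simpa [hS] using hk2
        · rw [PySem.List.slice_from _ (by positivity)]
          have hds : PySem.Str.join "." ((S.map String.ofList).drop (k : Int).toNat) = d := by
            rw [← String.toList_inj]
            simp [PySem.Str.join, show (".").toList = ['.'] from rfl, ← List.map_drop,
                  List.map_map, Function.comp_def, String.toList_ofList]
            exact hdk.symm
          rw [hds]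
          simpa [PySem.Set.contains_iff] using hd

-- ===== VERDICT (by name: the statement is the Claim_ definition above) =====
theorem domain_in_set_py_spec : Claim_equal_domain_in_set_py := by
  intro domain domains _
  unfold Spec_domain_in_set_py
  exact pv_main domain domains
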